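-- pv_equiv track=rewrite | github.com/minghu6/leet-code | 0335_palindrome_pairs/py0335/trie_manacher.py | prefix_postfix_palindrome_table
-- ===== SOURCE A (Python) =====
-- from typing import List, Iterable, Optional, Tuple
--
-- def prefix_postfix_palindrome_table(s: str) -> Tuple[List[int], List[int]]:
--     d1 = compute_d1(s)
--     d2 = compute_d2(s)
--     n = len(s)
--
--     prefix = [False] * n
--     postfix = [False] * n
--
--     for i, r in enumerate(d1):
--         rl = i-r+1
--         rr = i+r-1
--
--         if rl == 0:
--             prefix[rr] = True
--         if rr == n-1:
--             postfix[rl] = True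
--
--     for i, r in enumerate(d2):
--         if r == 0:
--             continue
--
--         rl = i-r
--         rr = i+r-1
--
--         if rl == 0:
--             prefix[rr] = True
--         if rr == n-1:
--             postfix[rl] = True
--
--     return prefix, postfix
--
-- def compute_d1(s: str) -> List[int]:
--     """ return (i, r) """
--
--     n = len(s)
--
--     d1 = [1] * n
--
--     rl = 0  # rightmost left
--     rr = 0  # rightmost right
--
--     for i in range(1, n-1):
--         if i < rr:
--             j = rr - i + rl
--
--             if d1[j] < j - rl + 1:
--                 d1[i] = d1[j]
--                 continue
--             else:
--                 r = j - rl + 1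
--         else:
--             r = 1
--
--         while i+r-1 < n-1 and i-(r-1) > 0 and s[i+r] == s[i-r]:
--             r += 1
--
--         if i+r-1 > rr:
--             rr = i+r-1
--             rl = i-(r-1)
--
--         d1[i] = r
--
--     return d1
--
-- def compute_d2(s: str) -> List[int]:
--     """ return (i, r) """
--
--     n = len(s)
--
--     d2 = [0] * n
--
--     rl = 0  # rightmost left
--     rr = 0  # rightmost right
--
--     for i in range(1, n):
--         if i < rr:
--             j = rr - i + rl + 1
--
--             if d2[j] < j - rl:
--                 d2[i] = d2[j]
--                 continue
--             else:
--                 r = j - rl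
--         else:
--             r = 0
--
--         while i+r-1 < n-1 and i-r > 0 and s[i-r-1] == s[i+r]:
--             r += 1
--
--         if i+r-1 > rr:
--             rr = i+r-1
--             rl = i-r
--
--         d2[i] = r
--
--     return d2
-- ===== SOURCE B (Python) =====
-- def prefix_postfix_palindrome_table(s):
--     n = len(s)
--     prefix = []
--     postfix = []
--     for i in range(n):
--         p = s[:i+1]
--         prefix.append(p == p[::-1])
--         q = s[i:]
--         postfix.append(q == q[::-1])
--     return prefix, postfix
-- ===== Notes on version B (the rewrite author's own statement) =====
-- stated objective: simpler
-- what changed: Replaced the Manacher radius arrays (d1/d2) and the two marking passes by direct per-position palindrome tests: prefix[i] iff s[:i+1] equals its reverse, postfix[i] iff s[i:] equals its reverse.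
import Mathlib
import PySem

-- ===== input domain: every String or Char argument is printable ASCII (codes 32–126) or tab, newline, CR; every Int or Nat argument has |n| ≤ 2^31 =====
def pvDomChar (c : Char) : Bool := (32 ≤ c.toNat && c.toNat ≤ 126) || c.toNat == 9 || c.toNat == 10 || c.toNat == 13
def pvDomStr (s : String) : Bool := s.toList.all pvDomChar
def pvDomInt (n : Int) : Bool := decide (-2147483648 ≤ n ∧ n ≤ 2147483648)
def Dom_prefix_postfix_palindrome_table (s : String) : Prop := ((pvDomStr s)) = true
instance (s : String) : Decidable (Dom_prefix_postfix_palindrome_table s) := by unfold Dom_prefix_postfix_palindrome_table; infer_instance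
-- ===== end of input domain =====

-- B replaces A's Manacher radius arrays (d1/d2) and marking passes by direct per-position
-- slice-reverse palindrome tests (simpler; O(n^2) instead of A's O(n); no speed claim).

-- ===== PORT A =====
-- s[k] for the Nat indices A uses (always nonnegative and in range when read)
def pvG (l : List Char) (k : Nat) : Char := l.getD k ' '

-- the `while` loop of compute_d1 (r += 1 until the condition fails)
def pvExpand1 (l : List Char) (i r : Nat) : Nat :=
  if h : i + r - 1 < l.length - 1 ∧ 0 < i - (r - 1) ∧ pvG l (i + r) = pvG l (i - r) then
    pvExpand1 l i (r + 1)
  else r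
termination_by l.length - r
decreasing_by obtain ⟨h1, -, -⟩ := h; omega

-- tail of a compute_d1 iteration: d1[i] = r and the rightmost-window update
def pvUpd1 (d1 : List Nat) (rl rr i r : Nat) : List Nat × Nat × Nat :=
  if rr < i + r - 1 then (d1.set i r, i - (r - 1), i + r - 1)
  else (d1.set i r, rl, rr)

-- one iteration of compute_d1's for-loop (state d1, rl, rr); loop indices are ≥ 1 and
-- every subtraction Python performs here is nonnegative, so Nat arithmetic is exact
def pvStep1 (l : List Char) (st : List Nat × Nat × Nat) (i : Nat) : List Nat × Nat × Nat :=
  let d1 := st.1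
  let rl := st.2.1
  let rr := st.2.2
  if i < rr then
    let j := rr - i + rl
    if d1.getD j 0 < j - rl + 1 then
      (d1.set i (d1.getD j 0), rl, rr)
    else
      pvUpd1 d1 rl rr i (pvExpand1 l i (j - rl + 1))
  else
    pvUpd1 d1 rl rr i (pvExpand1 l i 1)

-- compute_d1; `for i in range(1, n-1)` over Nat loop indices
def pvD1 (l : List Char) : List Nat :=
  ((List.range' 1 (l.length - 1 - 1)).foldl (pvStep1 l) (List.replicate l.length 1, 0, 0)).1

-- the `while` loop of compute_d2
def pvExpand2 (l : List Char) (i r : Nat) : Nat :=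
  if h : i + r - 1 < l.length - 1 ∧ 0 < i - r ∧ pvG l (i - r - 1) = pvG l (i + r) then
    pvExpand2 l i (r + 1)
  else r
termination_by l.length - r
decreasing_by obtain ⟨h1, -, -⟩ := h; omega

def pvUpd2 (d2 : List Nat) (rl rr i r : Nat) : List Nat × Nat × Nat :=
  if rr < i + r - 1 then (d2.set i r, i - r, i + r - 1)
  else (d2.set i r, rl, rr)

def pvStep2 (l : List Char) (st : List Nat × Nat × Nat) (i : Nat) : List Nat × Nat × Nat :=
  let d2 := st.1
  let rl := st.2.1
  let rr := st.2.2
  if i < rr then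
    let j := rr - i + rl + 1
    if d2.getD j 0 < j - rl then
      (d2.set i (d2.getD j 0), rl, rr)
    else
      pvUpd2 d2 rl rr i (pvExpand2 l i (j - rl))
  else
    pvUpd2 d2 rl rr i (pvExpand2 l i 0)

-- compute_d2; `for i in range(1, n)` over Nat loop indices
def pvD2 (l : List Char) : List Nat :=
  ((List.range' 1 (l.length - 1)).foldl (pvStep2 l) (List.replicate l.length 0, 0, 0)).1

-- one iteration of the `for i, r in enumerate(d1)` marking loop
def pvMark1 (n : Nat) (pp : List Bool × List Bool) (p : Int × Nat) : List Bool × List Bool :=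
  let i := p.1
  let r : Int := (p.2 : Int)
  let rl := i - r + 1
  let rr := i + r - 1
  (if rl = 0 then pp.1.set rr.toNat true else pp.1,
   if rr = (n : Int) - 1 then pp.2.set rl.toNat true else pp.2)

-- one iteration of the `for i, r in enumerate(d2)` marking loop (continue on r == 0)
def pvMark2 (n : Nat) (pp : List Bool × List Bool) (p : Int × Nat) : List Bool × List Bool :=
  if p.2 = 0 then pp
  else
    let i := p.1
    let r : Int := (p.2 : Int)
    let rl := i - r
    let rr := i + r - 1
    (if rl = 0 then pp.1.set rr.toNat true else pp.1,
     if rr = (n : Int) - 1 then pp.2.set rl.toNat true else pp.2)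

def prefix_postfix_palindrome_table (s : String) : List Bool × List Bool :=
  let l := s.toList
  let n := l.length
  let d1 := pvD1 l
  let d2 := pvD2 l
  let pp0 : List Bool × List Bool := (List.replicate n false, List.replicate n false)
  let pp1 := (PySem.List.enumerate d1 0).foldl (pvMark1 n) pp0
  (PySem.List.enumerate d2 0).foldl (pvMark2 n) pp1

-- ===== PORT B =====
-- s[:i+1] is l.take (i+1), s[i:] is l.drop i (nonnegative in-range bounds; cf.
-- PySem.List.slice_to_natCast / slice_from_natCast); s[::-1] is List.reverse
-- (PySem.List.slice?_none_none_neg_one)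
def prefix_postfix_palindrome_table_alt (s : String) : List Bool × List Bool :=
  let l := s.toList
  let n := l.length
  (List.range n).foldl
    (fun pp i =>
      let p := l.take (i + 1)
      let q := l.drop i
      (pp.1 ++ [p == p.reverse], pp.2 ++ [q == q.reverse]))
    ([], [])

-- ===== PRECONDITION & SPEC =====
def Spec_prefix_postfix_palindrome_table (s : String) (out : List Bool × List Bool) : Prop := out = prefix_postfix_palindrome_table_alt s
instance (s : String) (out : List Bool × List Bool) : Decidable (Spec_prefix_postfix_palindrome_table s out) := by unfold Spec_prefix_postfix_palindrome_table; infer_instance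

-- ===== CLAIM (what is proved, stated in full; the proofs are below) =====
def Claim_equal_prefix_postfix_palindrome_table : Prop := ∀ (s : String), Dom_prefix_postfix_palindrome_table s → Spec_prefix_postfix_palindrome_table s (prefix_postfix_palindrome_table s)

-- ===== LEMMAS AND PROOFS =====

-- `Good1 l i r`: the odd palindrome of radius r centred at i fits in the string and matches
def Good1 (l : List Char) (i r : Nat) : Prop :=
  r ≤ i + 1 ∧ i + r ≤ l.length ∧ ∀ k, k < r → pvG l (i + k) = pvG l (i - k)

-- `Max1 l i r`: r is exactly the radius compute_d1 stores at i (the maximal odd radius)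
def Max1 (l : List Char) (i r : Nat) : Prop := Good1 l i r ∧ ¬ Good1 l i (r + 1)

-- `Good2 l i r`: the even palindrome s[i-r..i+r-1] fits in the string and matches
def Good2 (l : List Char) (i r : Nat) : Prop :=
  r ≤ i ∧ i + r ≤ l.length ∧ ∀ k, k < r → pvG l (i + k) = pvG l (i - k - 1)

def Max2 (l : List Char) (i r : Nat) : Prop := Good2 l i r ∧ ¬ Good2 l i (r + 1)

-- the rightmost-window state (rl, rr) delimits a palindrome
def Win (l : List Char) (rl rr : Nat) : Prop :=
  ∀ p, rl ≤ p → p ≤ rr → pvG l p = pvG l (rl + rr - p)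

lemma good1_mono {l : List Char} {i r r' : Nat} (h : Good1 l i r) (hle : r' ≤ r) : Good1 l i r' := by
  obtain ⟨h1, h2, h3⟩ := h
  exact ⟨by omega, by omega, fun k hk => h3 k (by omega)⟩

lemma good2_mono {l : List Char} {i r r' : Nat} (h : Good2 l i r) (hle : r' ≤ r) : Good2 l i r' := by
  obtain ⟨h1, h2, h3⟩ := h
  exact ⟨by omega, by omega, fun k hk => h3 k (by omega)⟩

lemma max1_unique {l : List Char} {i a b : Nat} (ha : Max1 l i a) (hb : Max1 l i b) : a = b := by
  rcases Nat.lt_trichotomy a b with h | h | h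
  · exact absurd (good1_mono hb.1 (by omega)) ha.2
  · exact h
  · exact absurd (good1_mono ha.1 (by omega)) hb.2

lemma max2_unique {l : List Char} {i a b : Nat} (ha : Max2 l i a) (hb : Max2 l i b) : a = b := by
  rcases Nat.lt_trichotomy a b with h | h | h
  · exact absurd (good2_mono hb.1 (by omega)) ha.2
  · exact h
  · exact absurd (good2_mono ha.1 (by omega)) hb.2

lemma good1_one {l : List Char} {i : Nat} (h : i < l.length) : Good1 l i 1 := by
  refine ⟨by omega, by omega, fun k hk => ?_⟩
  have hk0 : k = 0 := by omega
  subst hk0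
  simp

lemma expand1_max_aux (l : List Char) (i : Nat) (hi : 1 ≤ i) :
    ∀ fuel r, l.length - r ≤ fuel → 1 ≤ r → Good1 l i r → Max1 l i (pvExpand1 l i r) := by
  intro fuel
  induction fuel with
  | zero =>
    intro r hf hr hg
    rw [pvExpand1]
    split
    · next h => exact absurd h.1 (by omega)
    · next h =>
      refine ⟨hg, fun hg' => h ?_⟩
      obtain ⟨b1, b2, hm⟩ := hg'
      exact ⟨by omega, by omega, hm r (by omega)⟩
  | succ m ih =>
    intro r hf hr hg
    rw [pvExpand1]
    split
    · next h =>
      refine ih (r + 1) (by omega) (by omega) ?_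
      obtain ⟨h1, h2, h3⟩ := h
      refine ⟨by omega, by omega, fun k hk => ?_⟩
      rcases Nat.lt_or_ge k r with h' | h'
      · exact hg.2.2 k h'
      · have : k = r := by omega
        subst this; exact h3
    · next h =>
      refine ⟨hg, fun hg' => h ?_⟩
      obtain ⟨b1, b2, hm⟩ := hg'
      exact ⟨by omega, by omega, hm r (by omega)⟩

lemma expand1_max {l : List Char} {i r : Nat} (hr : 1 ≤ r) (hi : 1 ≤ i)
    (hg : Good1 l i r) : Max1 l i (pvExpand1 l i r) :=
  expand1_max_aux l i hi (l.length - r) r le_rfl hr hg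

lemma expand2_max_aux (l : List Char) (i : Nat) (hi : 1 ≤ i) :
    ∀ fuel r, l.length - r ≤ fuel → Good2 l i r → Max2 l i (pvExpand2 l i r) := by
  intro fuel
  induction fuel with
  | zero =>
    intro r hf hg
    rw [pvExpand2]
    split
    · next h => exact absurd h.1 (by omega)
    · next h =>
      refine ⟨hg, fun hg' => h ?_⟩
      obtain ⟨b1, b2, hm⟩ := hg'
      exact ⟨by omega, by omega, (hm r (by omega)).symm⟩
  | succ m ih =>
    intro r hf hg
    rw [pvExpand2]
    split
    · next h =>
      refine ih (r + 1) (by omega) ?_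
      obtain ⟨h1, h2, h3⟩ := h
      refine ⟨by omega, by omega, fun k hk => ?_⟩
      rcases Nat.lt_or_ge k r with h' | h'
      · exact hg.2.2 k h'
      · have : k = r := by omega
        subst this; exact h3.symm
    · next h =>
      refine ⟨hg, fun hg' => h ?_⟩
      obtain ⟨b1, b2, hm⟩ := hg'
      exact ⟨by omega, by omega, (hm r (by omega)).symm⟩

lemma expand2_max {l : List Char} {i r : Nat} (hi : 1 ≤ i)
    (hg : Good2 l i r) : Max2 l i (pvExpand2 l i r) :=
  expand2_max_aux l i hi (l.length - r) r le_rfl hg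

-- matches transfer across the window mirror (odd case)
lemma win_pair {l : List Char} {rl rr i j k : Nat} (hwin : Win l rl rr)
    (hij : i + j = rl + rr) (hji : j ≤ i) (h1 : rl + k ≤ j) (h2 : j + k ≤ rr) :
    (pvG l (i + k) = pvG l (i - k) ↔ pvG l (j + k) = pvG l (j - k)) := by
  have e1 := hwin (i + k) (by omega) (by omega)
  have e2 := hwin (i - k) (by omega) (by omega)
  rw [show rl + rr - (i + k) = j - k by omega] at e1
  rw [show rl + rr - (i - k) = j + k by omega] at e2
  rw [e1, e2]
  exact eq_comm

-- matches transfer across the window mirror (even case)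
lemma win_pair2 {l : List Char} {rl rr i j k : Nat} (hwin : Win l rl rr)
    (hij : i + j = rl + rr + 1) (hji : j ≤ i) (h1 : rl + k + 1 ≤ j) (h2 : j + k ≤ rr) :
    (pvG l (i + k) = pvG l (i - k - 1) ↔ pvG l (j + k) = pvG l (j - k - 1)) := by
  have e1 := hwin (i + k) (by omega) (by omega)
  have e2 := hwin (i - k - 1) (by omega) (by omega)
  rw [show rl + rr - (i + k) = j - k - 1 by omega] at e1
  rw [show rl + rr - (i - k - 1) = j + k by omega] at e2
  rw [e1, e2]
  exact eq_comm

lemma getD_set_self {α : Type} {xs : List α} {k : Nat} {v d : α} (h : k < xs.length) :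
    (xs.set k v).getD k d = v := by
  rw [List.getD_eq_getElem?_getD, List.getElem?_set_self (by omega)]
  rfl

lemma getD_set_ne {α : Type} {xs : List α} {k m : Nat} {v d : α} (h : k ≠ m) :
    (xs.set k v).getD m d = xs.getD m d := by
  rw [List.getD_eq_getElem?_getD, List.getElem?_set_ne h, ← List.getD_eq_getElem?_getD]

lemma getD_replicate {α : Type} {n k : Nat} {a d : α} (h : k < n) :
    (List.replicate n a).getD k d = a := by
  rw [List.getD_eq_getElem?_getD, List.getElem?_replicate]
  simp [h]

-- the compute_d1 loop invariant
def Inv1 (l : List Char) (i : Nat) (st : List Nat × Nat × Nat) : Prop :=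
  st.1.length = l.length ∧ (∀ k, k < i → Max1 l k (st.1.getD k 0)) ∧
  Win l st.2.1 st.2.2 ∧ st.2.2 < l.length ∧ st.2.1 + st.2.2 + 2 ≤ 2 * i

def Inv2 (l : List Char) (i : Nat) (st : List Nat × Nat × Nat) : Prop :=
  st.1.length = l.length ∧ (∀ k, k < i → Max2 l k (st.1.getD k 0)) ∧
  Win l st.2.1 st.2.2 ∧ st.2.2 < l.length ∧ st.2.1 + st.2.2 + 2 ≤ 2 * i

lemma upd1_inv {l : List Char} {d1 : List Nat} {rl rr i r : Nat} (hi : 1 ≤ i)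
    (hn : i + 2 ≤ l.length) (hlen : d1.length = l.length)
    (hmax : ∀ k, k < i → Max1 l k (d1.getD k 0))
    (hwin : Win l rl rr) (hrr : rr < l.length) (hsum : rl + rr + 2 ≤ 2 * i)
    (hr : Max1 l i r) :
    Inv1 l (i + 1) (pvUpd1 d1 rl rr i r) ∧
      ∀ k, i < k → (pvUpd1 d1 rl rr i r).1.getD k 0 = d1.getD k 0 := by
  have hr1 : 1 ≤ r := by
    by_contra h0
    apply hr.2
    have : r = 0 := by omega
    rw [this]
    exact good1_one (by omega)
  have hb1 : r ≤ i + 1 := hr.1.1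
  have hb2 : i + r ≤ l.length := hr.1.2.1
  have hset : ∀ k, k < i + 1 → Max1 l k ((d1.set i r).getD k 0) := by
    intro k hk
    rcases Nat.lt_or_ge k i with h' | h'
    · rw [getD_set_ne (by omega)]
      exact hmax k h'
    · have hki : k = i := by omega
      subst hki
      rw [getD_set_self (by omega)]
      exact hr
  have hlen' : (d1.set i r).length = l.length := by simpa using hlen
  unfold pvUpd1
  by_cases hupd : rr < i + r - 1
  · rw [if_pos hupd]
    refine ⟨⟨hlen', hset, ?_, show i + r - 1 < l.length by omega,
      show i - (r - 1) + (i + r - 1) + 2 ≤ 2 * (i + 1) by omega⟩,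
      fun k hk => getD_set_ne (by omega)⟩
    show Win l (i - (r - 1)) (i + r - 1)
    intro p hp1 hp2
    rcases Nat.lt_or_ge p i with hpi | hpi
    · have := hr.1.2.2 (i - p) (by omega)
      rw [show i - (i - p) = p by omega] at this
      rw [show i - (r - 1) + (i + r - 1) - p = i + (i - p) by omega]
      exact this.symm
    · have := hr.1.2.2 (p - i) (by omega)
      rw [show i + (p - i) = p by omega] at this
      rw [show i - (r - 1) + (i + r - 1) - p = i - (p - i) by omega]
      exact this
  · rw [if_neg hupd]
    exact ⟨⟨hlen', hset, hwin, hrr, show rl + rr + 2 ≤ 2 * (i + 1) by omega⟩,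
      fun k hk => getD_set_ne (by omega)⟩

lemma upd2_inv {l : List Char} {d2 : List Nat} {rl rr i r : Nat} (hi : 1 ≤ i)
    (hn : i + 1 ≤ l.length) (hlen : d2.length = l.length)
    (hmax : ∀ k, k < i → Max2 l k (d2.getD k 0))
    (hwin : Win l rl rr) (hrr : rr < l.length) (hsum : rl + rr + 2 ≤ 2 * i)
    (hr : Max2 l i r) :
    Inv2 l (i + 1) (pvUpd2 d2 rl rr i r) ∧
      ∀ k, i < k → (pvUpd2 d2 rl rr i r).1.getD k 0 = d2.getD k 0 := by
  have hb1 : r ≤ i := hr.1.1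
  have hb2 : i + r ≤ l.length := hr.1.2.1
  have hset : ∀ k, k < i + 1 → Max2 l k ((d2.set i r).getD k 0) := by
    intro k hk
    rcases Nat.lt_or_ge k i with h' | h'
    · rw [getD_set_ne (by omega)]
      exact hmax k h'
    · have hki : k = i := by omega
      subst hki
      rw [getD_set_self (by omega)]
      exact hr
  have hlen' : (d2.set i r).length = l.length := by simpa using hlen
  unfold pvUpd2
  by_cases hupd : rr < i + r - 1
  · rw [if_pos hupd]
    refine ⟨⟨hlen', hset, ?_, show i + r - 1 < l.length by omega,
      show i - r + (i + r - 1) + 2 ≤ 2 * (i + 1) by omega⟩,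
      fun k hk => getD_set_ne (by omega)⟩
    show Win l (i - r) (i + r - 1)
    intro p hp1 hp2
    rcases Nat.lt_or_ge p i with hpi | hpi
    · have := hr.1.2.2 (i - p - 1) (by omega)
      rw [show i - (i - p - 1) - 1 = p by omega] at this
      rw [show i - r + (i + r - 1) - p = i + (i - p - 1) by omega]
      exact this.symm
    · have := hr.1.2.2 (p - i) (by omega)
      rw [show i + (p - i) = p by omega] at this
      rw [show i - r + (i + r - 1) - p = i - (p - i) - 1 by omega]
      exact this
  · rw [if_neg hupd]
    exact ⟨⟨hlen', hset, hwin, hrr, show rl + rr + 2 ≤ 2 * (i + 1) by omega⟩,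
      fun k hk => getD_set_ne (by omega)⟩

lemma step1_inv {l : List Char} {i : Nat} {st : List Nat × Nat × Nat} (hi : 1 ≤ i)
    (hn : i + 2 ≤ l.length) (h : Inv1 l i st) :
    Inv1 l (i + 1) (pvStep1 l st i) ∧
      ∀ k, i < k → (pvStep1 l st i).1.getD k 0 = st.1.getD k 0 := by
  obtain ⟨d1, rl, rr⟩ := st
  obtain ⟨hlen, hmax, hwin, hrr, hsum⟩ := h
  simp only at hlen hmax hwin hrr hsum
  unfold pvStep1
  simp only
  by_cases hir : i < rr
  · rw [if_pos hir]
    have hij : i + (rr - i + rl) = rl + rr := by omega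
    have hji : rr - i + rl + 2 ≤ i := by omega
    have hvmax : Max1 l (rr - i + rl) (d1.getD (rr - i + rl) 0) := hmax _ (by omega)
    have hv1 : 1 ≤ d1.getD (rr - i + rl) 0 := by
      rcases Nat.eq_zero_or_pos (d1.getD (rr - i + rl) 0) with h0 | h0
      · exfalso
        apply hvmax.2
        rw [h0]
        exact good1_one (by omega)
      · exact h0
    by_cases hcase : d1.getD (rr - i + rl) 0 < rr - i + rl - rl + 1
    · rw [if_pos hcase]
      have hvb : d1.getD (rr - i + rl) 0 ≤ rr - i := by omega
      have hgv : Good1 l i (d1.getD (rr - i + rl) 0) := by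
        refine ⟨by omega, by omega, fun k hk => ?_⟩
        exact (win_pair hwin hij (by omega) (by omega) (by omega)).mpr (hvmax.1.2.2 k hk)
      have hnv : ¬ Good1 l i (d1.getD (rr - i + rl) 0 + 1) := by
        intro hg'
        apply hvmax.2
        refine ⟨by omega, by omega, fun k hk => ?_⟩
        exact (win_pair hwin hij (by omega) (by omega) (by omega)).mp (hg'.2.2 k hk)
      refine ⟨⟨show (d1.set i (d1.getD (rr - i + rl) 0)).length = l.length by simpa using hlen,
        ?_, hwin, hrr, show rl + rr + 2 ≤ 2 * (i + 1) by omega⟩,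
        fun k hk => getD_set_ne (by omega)⟩
      intro k hk
      rcases Nat.lt_or_ge k i with h' | h'
      · rw [getD_set_ne (by omega)]
        exact hmax k h'
      · have : k = i := by omega
        subst this
        rw [getD_set_self (by omega)]
        exact ⟨hgv, hnv⟩
    · rw [if_neg hcase]
      have hgr0 : Good1 l i (rr - i + rl - rl + 1) := by
        refine ⟨by omega, by omega, fun k hk => ?_⟩
        exact (win_pair hwin hij (by omega) (by omega) (by omega)).mpr
          ((good1_mono hvmax.1 (by omega)).2.2 k hk)
      exact upd1_inv hi hn hlen hmax hwin hrr hsum (expand1_max (by omega) hi hgr0)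
  · rw [if_neg hir]
    exact upd1_inv hi hn hlen hmax hwin hrr hsum
      (expand1_max le_rfl hi (good1_one (by omega)))

lemma step2_inv {l : List Char} {i : Nat} {st : List Nat × Nat × Nat} (hi : 1 ≤ i)
    (hn : i + 1 ≤ l.length) (h : Inv2 l i st) :
    Inv2 l (i + 1) (pvStep2 l st i) ∧
      ∀ k, i < k → (pvStep2 l st i).1.getD k 0 = st.1.getD k 0 := by
  obtain ⟨d2, rl, rr⟩ := st
  obtain ⟨hlen, hmax, hwin, hrr, hsum⟩ := h
  simp only at hlen hmax hwin hrr hsum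
  unfold pvStep2
  simp only
  by_cases hir : i < rr
  · rw [if_pos hir]
    have hij : i + (rr - i + rl + 1) = rl + rr + 1 := by omega
    have hji : rr - i + rl + 1 + 1 ≤ i := by omega
    have hvmax : Max2 l (rr - i + rl + 1) (d2.getD (rr - i + rl + 1) 0) := hmax _ (by omega)
    by_cases hcase : d2.getD (rr - i + rl + 1) 0 < rr - i + rl + 1 - rl
    · rw [if_pos hcase]
      have hvb : d2.getD (rr - i + rl + 1) 0 + 1 ≤ rr - i + 1 := by omega
      have hgv : Good2 l i (d2.getD (rr - i + rl + 1) 0) := by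
        refine ⟨by omega, by omega, fun k hk => ?_⟩
        exact (win_pair2 hwin hij (by omega) (by omega) (by omega)).mpr (hvmax.1.2.2 k hk)
      have hnv : ¬ Good2 l i (d2.getD (rr - i + rl + 1) 0 + 1) := by
        intro hg'
        apply hvmax.2
        refine ⟨by omega, by omega, fun k hk => ?_⟩
        exact (win_pair2 hwin hij (by omega) (by omega) (by omega)).mp (hg'.2.2 k hk)
      refine ⟨⟨show (d2.set i (d2.getD (rr - i + rl + 1) 0)).length = l.length by simpa using hlen,
        ?_, hwin, hrr, show rl + rr + 2 ≤ 2 * (i + 1) by omega⟩,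
        fun k hk => getD_set_ne (by omega)⟩
      intro k hk
      rcases Nat.lt_or_ge k i with h' | h'
      · rw [getD_set_ne (by omega)]
        exact hmax k h'
      · have : k = i := by omega
        subst this
        rw [getD_set_self (by omega)]
        exact ⟨hgv, hnv⟩
    · rw [if_neg hcase]
      have hgr0 : Good2 l i (rr - i + rl + 1 - rl) := by
        refine ⟨by omega, by omega, fun k hk => ?_⟩
        exact (win_pair2 hwin hij (by omega) (by omega) (by omega)).mpr
          ((good2_mono hvmax.1 (by omega)).2.2 k hk)
      exact upd2_inv hi hn hlen hmax hwin hrr hsum (expand2_max hi hgr0)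
  · rw [if_neg hir]
    refine upd2_inv hi hn hlen hmax hwin hrr hsum (expand2_max hi ?_)
    exact ⟨by omega, by omega, fun k hk => absurd hk (by omega)⟩

lemma loop1 {l : List Char} : ∀ (cnt i : Nat) (st : List Nat × Nat × Nat), 1 ≤ i →
    i + cnt + 1 ≤ l.length → Inv1 l i st →
    Inv1 l (i + cnt) ((List.range' i cnt).foldl (pvStep1 l) st) ∧
      ∀ k, i + cnt ≤ k → ((List.range' i cnt).foldl (pvStep1 l) st).1.getD k 0 = st.1.getD k 0 := by
  intro cnt
  induction cnt with
  | zero => exact fun i st _ _ h => ⟨by simpa using h, fun _ _ => rfl⟩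
  | succ m ih =>
    intro i st hi hn h
    rw [List.range'_succ, List.foldl_cons]
    obtain ⟨h1, h2⟩ := step1_inv hi (by omega) h
    obtain ⟨g1, g2⟩ := ih (i + 1) _ (by omega) (by omega) h1
    refine ⟨by rw [show i + (m + 1) = i + 1 + m by omega]; exact g1, fun k hk => ?_⟩
    rw [g2 k (by omega), h2 k (by omega)]

lemma loop2 {l : List Char} : ∀ (cnt i : Nat) (st : List Nat × Nat × Nat), 1 ≤ i →
    i + cnt ≤ l.length → Inv2 l i st →
    Inv2 l (i + cnt) ((List.range' i cnt).foldl (pvStep2 l) st) ∧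
      ∀ k, i + cnt ≤ k → ((List.range' i cnt).foldl (pvStep2 l) st).1.getD k 0 = st.1.getD k 0 := by
  intro cnt
  induction cnt with
  | zero => exact fun i st _ _ h => ⟨by simpa using h, fun _ _ => rfl⟩
  | succ m ih =>
    intro i st hi hn h
    rw [List.range'_succ, List.foldl_cons]
    obtain ⟨h1, h2⟩ := step2_inv hi (by omega) h
    obtain ⟨g1, g2⟩ := ih (i + 1) _ (by omega) (by omega) h1
    refine ⟨by rw [show i + (m + 1) = i + 1 + m by omega]; exact g1, fun k hk => ?_⟩
    rw [g2 k (by omega), h2 k (by omega)]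

lemma max1_edge {l : List Char} {k : Nat} (hk : k < l.length) (he : k = 0 ∨ l.length ≤ k + 1) :
    Max1 l k 1 :=
  ⟨good1_one hk, fun hg => by obtain ⟨a, b, -⟩ := hg; omega⟩

lemma max2_zero {l : List Char} (h : 0 < l.length) : Max2 l 0 0 :=
  ⟨⟨le_rfl, by omega, fun k hk => absurd hk (by omega)⟩,
   fun hg => by obtain ⟨a, -, -⟩ := hg; omega⟩

lemma win_zero (l : List Char) : Win l 0 0 := by
  intro p h1 h2
  have : p = 0 := by omega
  subst this
  rfl

lemma pvD1_facts (l : List Char) :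
    (pvD1 l).length = l.length ∧ ∀ k, k < l.length → Max1 l k ((pvD1 l).getD k 0) := by
  unfold pvD1
  rcases Nat.lt_or_ge l.length 3 with hn | hn
  · rw [show l.length - 1 - 1 = 0 by omega]
    simp only [List.range', List.foldl_nil]
    refine ⟨by simp, fun k hk => ?_⟩
    rw [getD_replicate hk]
    exact max1_edge hk (by omega)
  · have base : Inv1 l 1 (List.replicate l.length 1, 0, 0) := by
      refine ⟨by simp, fun k hk => ?_, win_zero l, show (0 : Nat) < l.length by omega,
        show 0 + 0 + 2 ≤ 2 * 1 by omega⟩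
      have : k = 0 := by omega
      subst this
      rw [getD_replicate (by omega)]
      exact max1_edge (by omega) (Or.inl rfl)
    obtain ⟨hinv, hunch⟩ := loop1 (l.length - 2) 1 _ (by omega) (by omega) base
    rw [show l.length - 1 - 1 = l.length - 2 by omega]
    refine ⟨hinv.1, fun k hk => ?_⟩
    rcases Nat.lt_or_ge k (l.length - 1) with h' | h'
    · exact hinv.2.1 k (by omega)
    · have : k = l.length - 1 := by omega
      subst this
      rw [hunch _ (by omega), getD_replicate (by omega)]
      exact max1_edge hk (Or.inr (by omega))

lemma pvD2_facts (l : List Char) :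
    (pvD2 l).length = l.length ∧ ∀ k, k < l.length → Max2 l k ((pvD2 l).getD k 0) := by
  unfold pvD2
  rcases Nat.eq_zero_or_pos l.length with hn | hn
  · rw [hn]
    simp only [List.range', List.foldl_nil]
    exact ⟨by simp [hn], fun k hk => absurd hk (by omega)⟩
  · have base : Inv2 l 1 (List.replicate l.length 0, 0, 0) := by
      refine ⟨by simp, fun k hk => ?_, win_zero l, show (0 : Nat) < l.length by omega,
        show 0 + 0 + 2 ≤ 2 * 1 by omega⟩
      have : k = 0 := by omega
      subst this
      rw [getD_replicate (by omega)]
      exact max2_zero (by omega)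
    obtain ⟨hinv, hunch⟩ := loop2 (l.length - 1) 1 _ (by omega) (by omega) base
    exact ⟨hinv.1, fun k hk => hinv.2.1 k (by omega)⟩

lemma setTrue_getD {xs : List Bool} {t m : Nat} (hm : m < xs.length) :
    (xs.set t true).getD m false = (decide (t = m) || xs.getD m false) := by
  by_cases h : t = m
  · subst h
    rw [getD_set_self hm]
    simp
  · rw [getD_set_ne h]
    simp [h]

lemma mark1_len {n : Nat} : ∀ (xs : List (Int × Nat)) (pp : List Bool × List Bool),
    ((xs.foldl (pvMark1 n) pp).1.length = pp.1.length ∧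
     (xs.foldl (pvMark1 n) pp).2.length = pp.2.length) := by
  intro xs
  induction xs with
  | nil => exact fun pp => ⟨rfl, rfl⟩
  | cons p xs ih =>
    intro pp
    rw [List.foldl_cons]
    obtain ⟨a, b⟩ := ih (pvMark1 n pp p)
    constructor
    · rw [a]; unfold pvMark1; simp only; split <;> simp
    · rw [b]; unfold pvMark1; simp only; split <;> simp

lemma mark2_len {n : Nat} : ∀ (xs : List (Int × Nat)) (pp : List Bool × List Bool),
    ((xs.foldl (pvMark2 n) pp).1.length = pp.1.length ∧
     (xs.foldl (pvMark2 n) pp).2.length = pp.2.length) := by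
  intro xs
  induction xs with
  | nil => exact fun pp => ⟨rfl, rfl⟩
  | cons p xs ih =>
    intro pp
    rw [List.foldl_cons]
    obtain ⟨a, b⟩ := ih (pvMark2 n pp p)
    constructor
    · rw [a]; unfold pvMark2; split
      · rfl
      · simp only; split <;> simp
    · rw [b]; unfold pvMark2; split
      · rfl
      · simp only; split <;> simp

lemma mark1_fold {n : Nat} : ∀ (xs : List (Int × Nat)) (pp : List Bool × List Bool) (m : Nat),
    (∀ p ∈ xs, 0 ≤ p.1 ∧ (p.2 : Int) ≤ p.1 + 1) → m < pp.1.length → m < pp.2.length →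
    ((xs.foldl (pvMark1 n) pp).1.getD m false =
      (pp.1.getD m false ||
        xs.any fun p => decide (p.1 - (p.2 : Int) + 1 = 0 ∧ p.1 + (p.2 : Int) - 1 = (m : Int)))) ∧
    ((xs.foldl (pvMark1 n) pp).2.getD m false =
      (pp.2.getD m false ||
        xs.any fun p => decide (p.1 + (p.2 : Int) - 1 = (n : Int) - 1 ∧ p.1 - (p.2 : Int) + 1 = (m : Int)))) := by
  intro xs
  induction xs with
  | nil => intro pp m _ _ _; simp
  | cons p xs ih =>
    intro pp m hps hm1 hm2
    obtain ⟨hp0, hp1⟩ := hps p List.mem_cons_self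
    have hlen1 : (pvMark1 n pp p).1.length = pp.1.length := by
      unfold pvMark1; simp only; split <;> simp
    have hlen2 : (pvMark1 n pp p).2.length = pp.2.length := by
      unfold pvMark1; simp only; split <;> simp
    rw [List.foldl_cons, List.any_cons, List.any_cons]
    obtain ⟨ihA, ihB⟩ := ih (pvMark1 n pp p) m
      (fun q hq => hps q (List.mem_cons_of_mem _ hq)) (by omega) (by omega)
    rw [ihA, ihB]
    constructor
    · have hstep : (pvMark1 n pp p).1.getD m false =
          (pp.1.getD m false || decide (p.1 - (p.2 : Int) + 1 = 0 ∧ p.1 + (p.2 : Int) - 1 = (m : Int))) := by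
        unfold pvMark1
        simp only
        by_cases hc : p.1 - (p.2 : Int) + 1 = 0
        · rw [if_pos hc, setTrue_getD hm1]
          have e : ((p.1 + (p.2 : Int) - 1).toNat = m) ↔
              (p.1 - (p.2 : Int) + 1 = 0 ∧ p.1 + (p.2 : Int) - 1 = (m : Int)) := by omega
          rw [Bool.or_comm]
          congr 1
          rw [decide_eq_decide]
          exact e
        · rw [if_neg hc]
          have e : decide (p.1 - (p.2 : Int) + 1 = 0 ∧ p.1 + (p.2 : Int) - 1 = (m : Int)) = false := by
            simp [hc]
          rw [e, Bool.or_false]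
      rw [hstep, Bool.or_assoc]
    · have hstep : (pvMark1 n pp p).2.getD m false =
          (pp.2.getD m false || decide (p.1 + (p.2 : Int) - 1 = (n : Int) - 1 ∧ p.1 - (p.2 : Int) + 1 = (m : Int))) := by
        unfold pvMark1
        simp only
        by_cases hc : p.1 + (p.2 : Int) - 1 = (n : Int) - 1
        · rw [if_pos hc, setTrue_getD hm2]
          have e : ((p.1 - (p.2 : Int) + 1).toNat = m) ↔
              (p.1 + (p.2 : Int) - 1 = (n : Int) - 1 ∧ p.1 - (p.2 : Int) + 1 = (m : Int)) := by omega
          rw [Bool.or_comm]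
          congr 1
          rw [decide_eq_decide]
          exact e
        · rw [if_neg hc]
          have e : decide (p.1 + (p.2 : Int) - 1 = (n : Int) - 1 ∧ p.1 - (p.2 : Int) + 1 = (m : Int)) = false := by
            simp [hc]
          rw [e, Bool.or_false]
      rw [hstep, Bool.or_assoc]

lemma mark2_fold {n : Nat} : ∀ (xs : List (Int × Nat)) (pp : List Bool × List Bool) (m : Nat),
    (∀ p ∈ xs, 0 ≤ p.1 ∧ (p.2 : Int) ≤ p.1) → m < pp.1.length → m < pp.2.length →
    ((xs.foldl (pvMark2 n) pp).1.getD m false =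
      (pp.1.getD m false ||
        xs.any fun p => decide (p.2 ≠ 0 ∧ p.1 - (p.2 : Int) = 0 ∧ p.1 + (p.2 : Int) - 1 = (m : Int)))) ∧
    ((xs.foldl (pvMark2 n) pp).2.getD m false =
      (pp.2.getD m false ||
        xs.any fun p => decide (p.2 ≠ 0 ∧ p.1 + (p.2 : Int) - 1 = (n : Int) - 1 ∧ p.1 - (p.2 : Int) = (m : Int)))) := by
  intro xs
  induction xs with
  | nil => intro pp m _ _ _; simp
  | cons p xs ih =>
    intro pp m hps hm1 hm2
    obtain ⟨hp0, hp1⟩ := hps p List.mem_cons_self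
    have hlen1 : (pvMark2 n pp p).1.length = pp.1.length := by
      unfold pvMark2; split
      · rfl
      · simp only; split <;> simp
    have hlen2 : (pvMark2 n pp p).2.length = pp.2.length := by
      unfold pvMark2; split
      · rfl
      · simp only; split <;> simp
    rw [List.foldl_cons, List.any_cons, List.any_cons]
    obtain ⟨ihA, ihB⟩ := ih (pvMark2 n pp p) m
      (fun q hq => hps q (List.mem_cons_of_mem _ hq)) (by omega) (by omega)
    rw [ihA, ihB]
    constructor
    · have hstep : (pvMark2 n pp p).1.getD m false =
          (pp.1.getD m false ||
            decide (p.2 ≠ 0 ∧ p.1 - (p.2 : Int) = 0 ∧ p.1 + (p.2 : Int) - 1 = (m : Int))) := by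
        unfold pvMark2
        by_cases hz : p.2 = 0
        · rw [if_pos hz]
          have e : decide (p.2 ≠ 0 ∧ p.1 - (p.2 : Int) = 0 ∧ p.1 + (p.2 : Int) - 1 = (m : Int)) = false := by
            simp [hz]
          rw [e, Bool.or_false]
        · rw [if_neg hz]
          simp only
          by_cases hc : p.1 - (p.2 : Int) = 0
          · rw [if_pos hc, setTrue_getD hm1]
            have e : ((p.1 + (p.2 : Int) - 1).toNat = m) ↔
                (p.2 ≠ 0 ∧ p.1 - (p.2 : Int) = 0 ∧ p.1 + (p.2 : Int) - 1 = (m : Int)) := by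
              constructor
              · intro h; exact ⟨hz, hc, by omega⟩
              · intro h; omega
            rw [Bool.or_comm]
            congr 1
            rw [decide_eq_decide]
            exact e
          · rw [if_neg hc]
            have e : decide (p.2 ≠ 0 ∧ p.1 - (p.2 : Int) = 0 ∧ p.1 + (p.2 : Int) - 1 = (m : Int)) = false := by
              simp [hc]
            rw [e, Bool.or_false]
      rw [hstep, Bool.or_assoc]
    · have hstep : (pvMark2 n pp p).2.getD m false =
          (pp.2.getD m false ||
            decide (p.2 ≠ 0 ∧ p.1 + (p.2 : Int) - 1 = (n : Int) - 1 ∧ p.1 - (p.2 : Int) = (m : Int))) := by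
        unfold pvMark2
        by_cases hz : p.2 = 0
        · rw [if_pos hz]
          have e : decide (p.2 ≠ 0 ∧ p.1 + (p.2 : Int) - 1 = (n : Int) - 1 ∧ p.1 - (p.2 : Int) = (m : Int)) = false := by
            simp [hz]
          rw [e, Bool.or_false]
        · rw [if_neg hz]
          simp only
          by_cases hc : p.1 + (p.2 : Int) - 1 = (n : Int) - 1
          · rw [if_pos hc, setTrue_getD hm2]
            have e : ((p.1 - (p.2 : Int)).toNat = m) ↔
                (p.2 ≠ 0 ∧ p.1 + (p.2 : Int) - 1 = (n : Int) - 1 ∧ p.1 - (p.2 : Int) = (m : Int)) := by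
              constructor
              · intro h; exact ⟨hz, hc, by omega⟩
              · intro h; omega
            rw [Bool.or_comm]
            congr 1
            rw [decide_eq_decide]
            exact e
          · rw [if_neg hc]
            have e : decide (p.2 ≠ 0 ∧ p.1 + (p.2 : Int) - 1 = (n : Int) - 1 ∧ p.1 - (p.2 : Int) = (m : Int)) = false := by
              simp [hc]
            rw [e, Bool.or_false]
      rw [hstep, Bool.or_assoc]

lemma enum_any {α : Type} (xs : List α) (d : α) (P : Int → α → Prop) [∀ i a, Decidable (P i a)] :
    (((PySem.List.enumerate xs 0).any fun p => decide (P p.1 p.2)) = true) ↔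
      ∃ k, k < xs.length ∧ P (k : Int) (xs.getD k d) := by
  rw [List.any_eq_true]
  constructor
  · rintro ⟨p, hp, hc⟩
    rw [PySem.List.mem_enumerate_iff] at hp
    obtain ⟨k, hk, rfl⟩ := hp
    simp only [decide_eq_true_eq] at hc
    refine ⟨k, hk, ?_⟩
    rw [List.getD_eq_getElem xs d hk]
    simpa using hc
  · rintro ⟨k, hk, hP⟩
    refine ⟨((k : Int), xs[k]'hk), ?_, ?_⟩
    · rw [PySem.List.mem_enumerate_iff]
      exact ⟨k, hk, by simp⟩
    · simp only [decide_eq_true_eq]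
      rw [List.getD_eq_getElem xs d hk] at hP
      exact hP

lemma pvG_eq {l : List Char} {k : Nat} (h : k < l.length) : pvG l k = l[k] :=
  List.getD_eq_getElem l ' ' h

lemma take_pal_iff {l : List Char} {m : Nat} (hm : m < l.length) :
    (l.take (m + 1) = (l.take (m + 1)).reverse) ↔
      ∀ j, j ≤ m → pvG l j = pvG l (m - j) := by
  have hlen : (l.take (m + 1)).length = m + 1 := by
    rw [List.length_take]; omega
  constructor
  · intro h j hj
    have h1 : j < (l.take (m + 1)).length := by omega
    have e := List.getElem_of_eq h h1
    rw [List.getElem_reverse] at e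
    rw [List.getElem_take, List.getElem_take] at e
    have e2 : pvG l j = pvG l ((l.take (m + 1)).length - 1 - j) := by
      rw [pvG_eq (by omega), pvG_eq (by omega)]
      exact e
    rwa [show (l.take (m + 1)).length - 1 - j = m - j by omega] at e2
  · intro h
    apply List.ext_getElem (by simp)
    intro j h1 h2
    rw [List.getElem_reverse, List.getElem_take, List.getElem_take]
    have e2 : pvG l j = pvG l ((l.take (m + 1)).length - 1 - j) := by
      rw [show (l.take (m + 1)).length - 1 - j = m - j by omega]
      exact h j (by omega)
    rw [pvG_eq (by omega), pvG_eq (by omega)] at e2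
    exact e2

lemma drop_pal_iff {l : List Char} {m : Nat} (hm : m < l.length) :
    (l.drop m = (l.drop m).reverse) ↔
      ∀ j, j < l.length - m → pvG l (m + j) = pvG l (l.length - 1 - j) := by
  have hlen : (l.drop m).length = l.length - m := by rw [List.length_drop]
  constructor
  · intro h j hj
    have h1 : j < (l.drop m).length := by omega
    have e := List.getElem_of_eq h h1
    rw [List.getElem_reverse] at e
    rw [List.getElem_drop, List.getElem_drop] at e
    have e2 : pvG l (m + j) = pvG l (m + ((l.drop m).length - 1 - j)) := by
      rw [pvG_eq (by omega), pvG_eq (by omega)]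
      exact e
    rwa [show m + ((l.drop m).length - 1 - j) = l.length - 1 - j by omega] at e2
  · intro h
    apply List.ext_getElem (by simp)
    intro j h1 h2
    rw [List.getElem_reverse, List.getElem_drop, List.getElem_drop]
    have e2 : pvG l (m + j) = pvG l (m + ((l.drop m).length - 1 - j)) := by
      rw [show m + ((l.drop m).length - 1 - j) = l.length - 1 - j by omega]
      exact h j (by omega)
    rw [pvG_eq (by omega), pvG_eq (by omega)] at e2
    exact e2

-- A's prefix markings are exactly the palindromic prefixes
lemma pre_iff (l : List Char) (m : Nat) (hm : m < l.length) :
    ((∃ k, k < l.length ∧ (pvD1 l).getD k 0 = k + 1 ∧ 2 * k = m) ∨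
     (∃ k, k < l.length ∧ (pvD2 l).getD k 0 = k ∧ 2 * k = m + 1)) ↔
    (∀ j, j ≤ m → pvG l j = pvG l (m - j)) := by
  obtain ⟨-, hM1⟩ := pvD1_facts l
  obtain ⟨-, hM2⟩ := pvD2_facts l
  constructor
  · rintro (⟨k, hk, hveq, hm2⟩ | ⟨k, hk, hveq, hm2⟩) j hj
    · have hv : Good1 l k (k + 1) := by
        have := (hM1 k hk).1
        rwa [hveq] at this
      rcases Nat.lt_or_ge j k with h' | h'
      · have := hv.2.2 (k - j) (by omega)
        rw [show k - (k - j) = j by omega] at this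
        rw [show m - j = k + (k - j) by omega]
        exact this.symm
      · have := hv.2.2 (j - k) (by omega)
        rw [show k + (j - k) = j by omega] at this
        rw [show m - j = k - (j - k) by omega]
        exact this
    · have hv : Good2 l k k := by
        have := (hM2 k hk).1
        rwa [hveq] at this
      rcases Nat.lt_or_ge j k with h' | h'
      · have := hv.2.2 (k - j - 1) (by omega)
        rw [show k - (k - j - 1) - 1 = j by omega] at this
        rw [show m - j = k + (k - j - 1) by omega]
        exact this.symm
      · have := hv.2.2 (j - k) (by omega)
        rw [show k + (j - k) = j by omega] at this
        rw [show m - j = k - (j - k) - 1 by omega]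
        exact this
  · intro h
    rcases Nat.even_or_odd m with ⟨c, hc⟩ | ⟨c, hc⟩
    · refine Or.inl ⟨c, by omega, ?_, by omega⟩
      have hg : Good1 l c (c + 1) := by
        refine ⟨le_rfl, by omega, fun t ht => ?_⟩
        have := h (c + t) (by omega)
        rw [show m - (c + t) = c - t by omega] at this
        exact this
      have hv := hM1 c (by omega)
      have h1 : (pvD1 l).getD c 0 ≤ c + 1 := hv.1.1
      have h2 : ¬ (pvD1 l).getD c 0 < c + 1 := by
        intro hlt
        exact hv.2 (good1_mono hg (by omega))
      omega
    · refine Or.inr ⟨c + 1, by omega, ?_, by omega⟩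
      have hg : Good2 l (c + 1) (c + 1) := by
        refine ⟨le_rfl, by omega, fun t ht => ?_⟩
        have := h (c + 1 + t) (by omega)
        rw [show m - (c + 1 + t) = c + 1 - t - 1 by omega] at this
        exact this
      have hv := hM2 (c + 1) (by omega)
      have h1 : (pvD2 l).getD (c + 1) 0 ≤ c + 1 := hv.1.1
      have h2 : ¬ (pvD2 l).getD (c + 1) 0 < c + 1 := by
        intro hlt
        exact hv.2 (good2_mono hg (by omega))
      omega

-- A's postfix markings are exactly the palindromic suffixes
lemma post_iff (l : List Char) (m : Nat) (hm : m < l.length) :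
    ((∃ k, k < l.length ∧ k + (pvD1 l).getD k 0 = l.length ∧ k + 1 = m + (pvD1 l).getD k 0) ∨
     (∃ k, k < l.length ∧ (pvD2 l).getD k 0 ≠ 0 ∧ k + (pvD2 l).getD k 0 = l.length ∧
        k = m + (pvD2 l).getD k 0)) ↔
    (∀ j, j < l.length - m → pvG l (m + j) = pvG l (l.length - 1 - j)) := by
  obtain ⟨-, hM1⟩ := pvD1_facts l
  obtain ⟨-, hM2⟩ := pvD2_facts l
  constructor
  · rintro (⟨k, hk, hkv, hmv⟩ | ⟨k, hk, hv0, hkv, hmv⟩) j hj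
    · have hv : Good1 l k ((pvD1 l).getD k 0) := (hM1 k hk).1
      have hvpos : 1 ≤ (pvD1 l).getD k 0 := by omega
      rcases Nat.lt_or_ge (j + 1) ((pvD1 l).getD k 0) with h' | h'
      · have := hv.2.2 ((pvD1 l).getD k 0 - 1 - j) (by omega)
        rw [show k + ((pvD1 l).getD k 0 - 1 - j) = l.length - 1 - j by omega] at this
        rw [show k - ((pvD1 l).getD k 0 - 1 - j) = m + j by omega] at this
        exact this.symm
      · have := hv.2.2 (j + 1 - (pvD1 l).getD k 0) (by omega)
        rw [show k + (j + 1 - (pvD1 l).getD k 0) = m + j by omega] at this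
        rw [show k - (j + 1 - (pvD1 l).getD k 0) = l.length - 1 - j by omega] at this
        exact this
    · have hv : Good2 l k ((pvD2 l).getD k 0) := (hM2 k hk).1
      rcases Nat.lt_or_ge j ((pvD2 l).getD k 0) with h' | h'
      · have := hv.2.2 ((pvD2 l).getD k 0 - 1 - j) (by omega)
        rw [show k + ((pvD2 l).getD k 0 - 1 - j) = l.length - 1 - j by omega] at this
        rw [show k - ((pvD2 l).getD k 0 - 1 - j) - 1 = m + j by omega] at this
        exact this.symm
      · have := hv.2.2 (j - (pvD2 l).getD k 0) (by omega)
        rw [show k + (j - (pvD2 l).getD k 0) = m + j by omega] at this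
        rw [show k - (j - (pvD2 l).getD k 0) - 1 = l.length - 1 - j by omega] at this
        exact this
  · intro h
    rcases Nat.even_or_odd (l.length - m) with ⟨c, hc⟩ | ⟨c, hc⟩
    · have hc1 : 1 ≤ c := by omega
      refine Or.inr ⟨m + c, by omega, ?_⟩
      have hg : Good2 l (m + c) c := by
        refine ⟨by omega, by omega, fun t ht => ?_⟩
        have := h (c + t) (by omega)
        rw [show m + (c + t) = m + c + t by omega] at this
        rw [show l.length - 1 - (c + t) = m + c - t - 1 by omega] at this
        exact this
      have hng : ¬ Good2 l (m + c) (c + 1) := by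
        intro hg'
        obtain ⟨-, hb, -⟩ := hg'
        omega
      have := max2_unique (hM2 (m + c) (by omega)) ⟨hg, hng⟩
      exact ⟨by omega, by omega, by omega⟩
    · refine Or.inl ⟨m + c, by omega, ?_⟩
      have hg : Good1 l (m + c) (c + 1) := by
        refine ⟨by omega, by omega, fun t ht => ?_⟩
        have := h (c + t) (by omega)
        rw [show m + (c + t) = m + c + t by omega] at this
        rw [show l.length - 1 - (c + t) = m + c - t by omega] at this
        exact this
      have hng : ¬ Good1 l (m + c) (c + 2) := by
        intro hg'
        obtain ⟨-, hb, -⟩ := hg'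
        omega
      have := max1_unique (hM1 (m + c) (by omega)) ⟨hg, hng⟩
      exact ⟨by omega, by omega⟩

-- B's fold builds the two mapped lists
lemma alt_fold (l : List Char) : ∀ (xs : List Nat) (acc : List Bool × List Bool),
    xs.foldl
      (fun pp i =>
        let p := l.take (i + 1)
        let q := l.drop i
        (pp.1 ++ [p == p.reverse], pp.2 ++ [q == q.reverse])) acc =
    (acc.1 ++ xs.map (fun i => l.take (i + 1) == (l.take (i + 1)).reverse),
     acc.2 ++ xs.map (fun i => l.drop i == (l.drop i).reverse)) := by
  intro xs
  induction xs with
  | nil => intro acc; simp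
  | cons x xs ih =>
    intro acc
    rw [List.foldl_cons, ih]
    simp

lemma alt_eq (s : String) : prefix_postfix_palindrome_table_alt s =
    ((List.range s.toList.length).map
       (fun i => s.toList.take (i + 1) == (s.toList.take (i + 1)).reverse),
     (List.range s.toList.length).map
       (fun i => s.toList.drop i == (s.toList.drop i).reverse)) := by
  unfold prefix_postfix_palindrome_table_alt
  simp only
  rw [alt_fold]
  simp

-- ===== VERDICT (by name: the statement is the Claim_ definition above) =====
theorem prefix_postfix_palindrome_table_spec : Claim_equal_prefix_postfix_palindrome_table := by
  intro s _
  unfold Spec_prefix_postfix_palindrome_table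
  rw [alt_eq]
  obtain ⟨hL1, hM1⟩ := pvD1_facts s.toList
  obtain ⟨hL2, hM2⟩ := pvD2_facts s.toList
  unfold prefix_postfix_palindrome_table
  simp only
  have hside1 : ∀ p ∈ PySem.List.enumerate (pvD1 s.toList) 0, 0 ≤ p.1 ∧ (p.2 : Int) ≤ p.1 + 1 := by
    intro p hp
    rw [PySem.List.mem_enumerate_iff] at hp
    obtain ⟨k, hk, rfl⟩ := hp
    have h' : (pvD1 s.toList)[k] ≤ k + 1 := by
      rw [← List.getD_eq_getElem (pvD1 s.toList) 0 hk]
      exact (hM1 k (by omega)).1.1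
    constructor
    · simp
    · simp only [zero_add]
      exact_mod_cast h'
  have hside2 : ∀ p ∈ PySem.List.enumerate (pvD2 s.toList) 0, 0 ≤ p.1 ∧ (p.2 : Int) ≤ p.1 := by
    intro p hp
    rw [PySem.List.mem_enumerate_iff] at hp
    obtain ⟨k, hk, rfl⟩ := hp
    have h' : (pvD2 s.toList)[k] ≤ k := by
      rw [← List.getD_eq_getElem (pvD2 s.toList) 0 hk]
      exact (hM2 k (by omega)).1.1
    constructor
    · simp
    · simp only [zero_add]
      exact_mod_cast h'
  obtain ⟨len1a, len1b⟩ := mark1_len (n := s.toList.length) (PySem.List.enumerate (pvD1 s.toList) 0)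
    (List.replicate s.toList.length false, List.replicate s.toList.length false)
  obtain ⟨len2a, len2b⟩ := mark2_len (n := s.toList.length) (PySem.List.enumerate (pvD2 s.toList) 0)
    ((PySem.List.enumerate (pvD1 s.toList) 0).foldl (pvMark1 s.toList.length)
      (List.replicate s.toList.length false, List.replicate s.toList.length false))
  refine Prod.ext ?_ ?_
  · apply List.ext_getElem (by rw [len2a, len1a]; simp)
    intro m hma hmb
    have hm : m < s.toList.length := by simpa using hmb
    rw [← List.getD_eq_getElem _ false hma]
    obtain ⟨f2A, -⟩ := mark2_fold (n := s.toList.length) (PySem.List.enumerate (pvD2 s.toList) 0) _ m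
      hside2 (by rw [len1a]; simpa using hm) (by rw [len1b]; simpa using hm)
    rw [f2A]
    obtain ⟨f1A, -⟩ := mark1_fold (n := s.toList.length) (PySem.List.enumerate (pvD1 s.toList) 0)
      (List.replicate s.toList.length false, List.replicate s.toList.length false) m
      hside1 (by simpa using hm) (by simpa using hm)
    rw [f1A, getD_replicate hm, List.getElem_map, List.getElem_range]
    simp only [Bool.false_or]
    have conv1 : (((PySem.List.enumerate (pvD1 s.toList) 0).any fun p =>
        decide (p.1 - (p.2 : Int) + 1 = 0 ∧ p.1 + (p.2 : Int) - 1 = (m : Int))) = true) ↔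
        ∃ k, k < s.toList.length ∧ (pvD1 s.toList).getD k 0 = k + 1 ∧ 2 * k = m := by
      have e := enum_any (pvD1 s.toList) 0
        (fun i v => i - (v : Int) + 1 = 0 ∧ i + (v : Int) - 1 = (m : Int))
      refine e.trans ?_
      constructor
      · rintro ⟨k, hk, hc1, hc2⟩
        exact ⟨k, by omega, by omega, by omega⟩
      · rintro ⟨k, hk, hc1, hc2⟩
        exact ⟨k, by omega, by omega, by omega⟩
    have conv2 : (((PySem.List.enumerate (pvD2 s.toList) 0).any fun p =>
        decide (p.2 ≠ 0 ∧ p.1 - (p.2 : Int) = 0 ∧ p.1 + (p.2 : Int) - 1 = (m : Int))) = true) ↔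
        ∃ k, k < s.toList.length ∧ (pvD2 s.toList).getD k 0 = k ∧ 2 * k = m + 1 := by
      have e := enum_any (pvD2 s.toList) 0
        (fun i v => v ≠ 0 ∧ i - (v : Int) = 0 ∧ i + (v : Int) - 1 = (m : Int))
      refine e.trans ?_
      constructor
      · rintro ⟨k, hk, hc0, hc1, hc2⟩
        exact ⟨k, by omega, by omega, by omega⟩
      · rintro ⟨k, hk, hc1, hc2⟩
        exact ⟨k, by omega, by omega, by omega, by omega⟩
    rw [Bool.eq_iff_iff, Bool.or_eq_true, conv1, conv2, beq_iff_eq, take_pal_iff hm]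
    exact pre_iff s.toList m hm
  · apply List.ext_getElem (by rw [len2b, len1b]; simp)
    intro m hma hmb
    have hm : m < s.toList.length := by simpa using hmb
    rw [← List.getD_eq_getElem _ false hma]
    obtain ⟨-, f2B⟩ := mark2_fold (n := s.toList.length) (PySem.List.enumerate (pvD2 s.toList) 0) _ m
      hside2 (by rw [len1a]; simpa using hm) (by rw [len1b]; simpa using hm)
    rw [f2B]
    obtain ⟨-, f1B⟩ := mark1_fold (n := s.toList.length) (PySem.List.enumerate (pvD1 s.toList) 0)
      (List.replicate s.toList.length false, List.replicate s.toList.length false) m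
      hside1 (by simpa using hm) (by simpa using hm)
    rw [f1B, getD_replicate hm, List.getElem_map, List.getElem_range]
    simp only [Bool.false_or]
    have conv1 : (((PySem.List.enumerate (pvD1 s.toList) 0).any fun p =>
        decide (p.1 + (p.2 : Int) - 1 = (s.toList.length : Int) - 1 ∧ p.1 - (p.2 : Int) + 1 = (m : Int))) = true) ↔
        ∃ k, k < s.toList.length ∧ k + (pvD1 s.toList).getD k 0 = s.toList.length ∧
          k + 1 = m + (pvD1 s.toList).getD k 0 := by
      have e := enum_any (pvD1 s.toList) 0
        (fun i v => i + (v : Int) - 1 = (s.toList.length : Int) - 1 ∧ i - (v : Int) + 1 = (m : Int))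
      refine e.trans ?_
      constructor
      · rintro ⟨k, hk, hc1, hc2⟩
        exact ⟨k, by omega, by omega, by omega⟩
      · rintro ⟨k, hk, hc1, hc2⟩
        exact ⟨k, by omega, by omega, by omega⟩
    have conv2 : (((PySem.List.enumerate (pvD2 s.toList) 0).any fun p =>
        decide (p.2 ≠ 0 ∧ p.1 + (p.2 : Int) - 1 = (s.toList.length : Int) - 1 ∧ p.1 - (p.2 : Int) = (m : Int))) = true) ↔
        ∃ k, k < s.toList.length ∧ (pvD2 s.toList).getD k 0 ≠ 0 ∧
          k + (pvD2 s.toList).getD k 0 = s.toList.length ∧ k = m + (pvD2 s.toList).getD k 0 := by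
      have e := enum_any (pvD2 s.toList) 0
        (fun i v => v ≠ 0 ∧ i + (v : Int) - 1 = (s.toList.length : Int) - 1 ∧ i - (v : Int) = (m : Int))
      refine e.trans ?_
      constructor
      · rintro ⟨k, hk, hc0, hc1, hc2⟩
        exact ⟨k, by omega, by omega, by omega, by omega⟩
      · rintro ⟨k, hk, hc0, hc1, hc2⟩
        exact ⟨k, by omega, by omega, by omega, by omega⟩
    rw [Bool.eq_iff_iff, Bool.or_eq_true, conv1, conv2, beq_iff_eq, drop_pal_iff hm]
    exact post_iff s.toList m hm
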